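-- pv_equiv track=rewrite | github.com/IROCX/InterviewCodingQuestionsPractice | validPairSum.py | ValidPair
-- ===== SOURCE A (Python) =====
-- def ValidPair(arr, n):
--     arr.sort()
--     cost = 0
--     i, j = 0, n - 1
--     while i < j:
--         if arr[i] + arr[j] > 0:
--             cost += j - i
--             j -= 1
--         else:
--             i += 1
--     return cost
-- ===== SOURCE B (Python) =====
-- def _bisect_right(a, x, lo, hi):
--     while lo < hi:
--         mid = (lo + hi) // 2
--         if x < a[mid]:
--             hi = mid
--         else:
--             lo = mid + 1
--     return lo
--
--
-- def ValidPair(arr, n):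
--     arr.sort()
--     cost = 0
--     for j in range(n):
--         cost += j - _bisect_right(arr, -arr[j], 0, j)
--     return cost
-- ===== Notes on version B (the rewrite author's own statement) =====
-- stated objective: alternative
-- what changed: Replaces the single two-pointer sweep over the sorted array with a per-element hand-written binary search (bisect_right of -arr[j] over the sorted prefix arr[0:j]) summed over j in range(n).
-- outside the precondition, e.g. on ValidPair([], 1): A returns 0, B raises IndexError
import Mathlib
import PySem

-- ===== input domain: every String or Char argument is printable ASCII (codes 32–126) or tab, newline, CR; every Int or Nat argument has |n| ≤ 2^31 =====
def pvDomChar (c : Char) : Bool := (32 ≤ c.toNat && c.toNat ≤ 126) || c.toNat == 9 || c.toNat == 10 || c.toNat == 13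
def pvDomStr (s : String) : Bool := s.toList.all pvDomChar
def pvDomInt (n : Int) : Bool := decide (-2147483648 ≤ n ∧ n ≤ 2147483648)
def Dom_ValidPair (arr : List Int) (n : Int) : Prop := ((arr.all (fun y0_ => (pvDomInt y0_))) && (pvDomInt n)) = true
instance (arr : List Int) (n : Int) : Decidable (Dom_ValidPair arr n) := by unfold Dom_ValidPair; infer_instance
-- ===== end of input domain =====

-- B replaces A's two-pointer sweep with a per-element binary search over the sorted
-- prefix (alternative algorithm, similar cost).  Both Pythons sort `arr` in place;
-- the equivalence proved here is about the RETURN value only.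


-- ===== PORT A =====
-- the while-loop of A: state (i, j, cost); indices are in range inside Pre_
def ValidPairGo (s : List Int) (i j cost : Int) : Int :=
  if _h : i < j then
    if PySem.List.pyGetD s i 0 + PySem.List.pyGetD s j 0 > 0 then
      ValidPairGo s i (j - 1) (cost + (j - i))
    else
      ValidPairGo s (i + 1) j cost
  else cost
termination_by (j - i).toNat
decreasing_by all_goals omega

def ValidPair (arr : List Int) (n : Int) : Int :=
  let s := PySem.List.sorted arr (fun x => x) false    -- arr.sort()
  ValidPairGo s 0 (n - 1) 0

-- ===== PORT B =====
-- Source B's hand-written _bisect_right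
def BisectGo (a : List Int) (x lo hi : Int) : Int :=
  if _h : lo < hi then
    let mid := PySem.Int.floordiv (lo + hi) 2
    if x < PySem.List.pyGetD a mid 0 then BisectGo a x lo mid
    else BisectGo a x (mid + 1) hi
  else lo
termination_by (hi - lo).toNat
decreasing_by
  · have h1 : PySem.Int.floordiv (lo + hi) 2 < hi :=
      (PySem.Int.floordiv_lt_iff_lt_mul (by omega)).mpr (by omega)
    omega
  · have h2 : lo ≤ PySem.Int.floordiv (lo + hi) 2 :=
      (PySem.Int.le_floordiv_iff_mul_le (by omega)).mpr (by omega)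
    omega

def ValidPair_alt (arr : List Int) (n : Int) : Int :=
  let s := PySem.List.sorted arr (fun x => x) false    -- arr.sort()
  (PySem.List.pyRange 0 n 1).foldl
    (fun cost j => cost + (j - BisectGo s (-(PySem.List.pyGetD s j 0)) 0 j)) 0

-- ===== PRECONDITION & SPEC =====
-- Pre_ excludes n > len(arr), where A's loop raises IndexError on arr[n-1] whenever
-- n ≥ 2; this additionally excludes the single returning corner n == 1 with arr == [],
-- where A returns 0 without indexing but B's per-element loop indexes arr[0] and raises.
def Pre_ValidPair (arr : List Int) (n : Int) : Prop := n ≤ (arr.length : Int)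
instance (arr : List Int) (n : Int) : Decidable (Pre_ValidPair arr n) := by
  unfold Pre_ValidPair; infer_instance

def pvWitness_ValidPair : List Int × Int := ([1, -2, 3, -1], 4)

def Spec_ValidPair (arr : List Int) (n : Int) (out : Int) : Prop := out = ValidPair_alt arr n
instance (arr : List Int) (n : Int) (out : Int) : Decidable (Spec_ValidPair arr n out) := by
  unfold Spec_ValidPair; infer_instance

-- ===== CLAIM (what is proved, stated in full; the proofs are below) =====
def Claim_equal_ValidPair : Prop := ∀ (arr : List Int) (n : Int),
  Dom_ValidPair arr n → Pre_ValidPair arr n → Spec_ValidPair arr n (ValidPair arr n)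

-- ===== LEMMAS AND PROOFS =====

-- count of indices k ∈ [a, b) with p k
def pvIcnt (p : Nat → Bool) (a b : Nat) : Nat := (List.range' a (b - a)).countP p

-- the pair predicate: s[a] + s[b] > 0
def pvPred (s : List Int) (b a : Nat) : Bool := decide (s.getD a 0 + s.getD b 0 > 0)

-- number of pairs (a, c) with i ≤ a < c ≤ j and s[a] + s[c] > 0
def pvPc (s : List Int) (i j : Nat) : Nat :=
  ((List.range' (i + 1) (j - i)).map (fun b => pvIcnt (pvPred s b) i b)).sum

theorem pvIcnt_nil (p : Nat → Bool) (a b : Nat) (h : b ≤ a) : pvIcnt p a b = 0 := by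
  unfold pvIcnt
  have : b - a = 0 := by omega
  simp [this]

theorem pvIcnt_split (p : Nat → Bool) (a m b : Nat) (h1 : a ≤ m) (h2 : m ≤ b) :
    pvIcnt p a b = pvIcnt p a m + pvIcnt p m b := by
  unfold pvIcnt
  rw [← List.countP_append]
  congr 1
  have hr := @List.range'_append a (m - a) (b - m) 1
  simp only [one_mul] at hr
  rw [show a + (m - a) = m by omega] at hr
  rw [show b - a = (m - a) + (b - m) by omega, ← hr]

theorem pvIcnt_all (p : Nat → Bool) (a b : Nat)
    (h : ∀ k, a ≤ k → k < b → p k = true) : pvIcnt p a b = b - a := by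
  unfold pvIcnt
  have hc : List.countP p (List.range' a (b - a)) = (List.range' a (b - a)).length := by
    rw [List.countP_eq_length]
    intro k hk
    have := List.mem_range'_1.mp hk
    exact h k this.1 (by omega)
  rw [hc, List.length_range']

theorem pvIcnt_zero (p : Nat → Bool) (a b : Nat)
    (h : ∀ k, a ≤ k → k < b → p k = false) : pvIcnt p a b = 0 := by
  unfold pvIcnt
  rw [List.countP_eq_zero]
  intro k hk
  have := List.mem_range'_1.mp hk
  simp [h k this.1 (by omega)]

theorem pvIcnt_not (p : Nat → Bool) (a b : Nat) (_h : a ≤ b) :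
    pvIcnt p a b + pvIcnt (fun k => !(p k)) a b = b - a := by
  unfold pvIcnt
  have hc : ∀ l : List Nat, l.countP p + l.countP (fun k => !(p k)) = l.length := by
    intro l
    induction l with
    | nil => simp
    | cons x xs ih => by_cases hx : p x <;> simp [hx] <;> omega
  rw [hc, List.length_range']

-- monotone access into a sorted list
theorem pvMono (s : List Int) (hs : List.Pairwise (fun a b : Int => a ≤ b) s)
    (p q : Nat) (hpq : p ≤ q) (hq : q < s.length) : s.getD p 0 ≤ s.getD q 0 := by
  rcases Nat.lt_or_ge p q with h | h
  · rw [List.getD_eq_getElem s 0 (by omega), List.getD_eq_getElem s 0 hq]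
    exact List.pairwise_iff_getElem.mp hs p q (by omega) hq h
  · have : p = q := by omega
    simp [this]

-- splitting off the last term of pvPc
theorem pvPc_top (s : List Int) (i j : Nat) (h : i < j) :
    pvPc s i j = pvPc s i (j - 1) + pvIcnt (pvPred s j) i j := by
  unfold pvPc
  rw [show j - i = (j - 1 - i) + 1 by omega, List.range'_1_concat]
  rw [List.map_append, List.sum_append]
  simp [show i + 1 + (j - 1 - i) = j by omega]

-- dropping the first index of pvPc when s[i] + s[j] ≤ 0
theorem pvPc_bot (s : List Int) (hs : List.Pairwise (fun a b : Int => a ≤ b) s)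
    (i j : Nat) (h : i < j) (hj : j < s.length)
    (hneg : ¬ s.getD i 0 + s.getD j 0 > 0) : pvPc s i j = pvPc s (i + 1) j := by
  unfold pvPc
  have hstep : ∀ b ∈ List.range' (i + 1) (j - i),
      pvIcnt (pvPred s b) i b = pvIcnt (pvPred s b) (i + 1) b := by
    intro b hb
    have hbr := List.mem_range'_1.mp hb
    have hbj : b ≤ j := by omega
    rw [pvIcnt_split (pvPred s b) i (i + 1) b (by omega) (by omega)]
    have : pvIcnt (pvPred s b) i (i + 1) = 0 := by
      apply pvIcnt_zero
      intro k hk1 hk2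
      have hk : k = i := by omega
      subst hk
      unfold pvPred
      have hsb : s.getD b 0 ≤ s.getD j 0 := pvMono s hs b j hbj hj
      simp only [decide_eq_false_iff_not]
      omega
    omega
  rw [List.map_congr_left hstep]
  rw [show j - i = (j - (i + 1)) + 1 by omega, List.range'_succ]
  rw [List.map_cons, List.sum_cons]
  rw [pvIcnt_nil _ _ _ (le_refl (i + 1))]
  simp

-- A's loop computes the pair count
theorem pvGoA (s : List Int) (hs : List.Pairwise (fun a b : Int => a ≤ b) s) :
    ∀ (d i j : Nat), j - i ≤ d → j < s.length → ∀ cost : Int,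
      ValidPairGo s (i : Int) (j : Int) cost = cost + (pvPc s i j : Int) := by
  intro d
  induction d with
  | zero =>
    intro i j hd hj cost
    have hij : ¬ ((i : Int) < (j : Int)) := by exact_mod_cast by omega
    rw [ValidPairGo]
    simp only [hij, dite_false]
    unfold pvPc
    rw [show j - i = 0 by omega]
    simp
  | succ d ih =>
    intro i j hd hj cost
    by_cases hij : i < j
    · have hij' : (i : Int) < (j : Int) := by exact_mod_cast hij
      rw [ValidPairGo]
      simp only [hij', dite_true, PySem.List.pyGetD_natCast]
      by_cases hpos : s.getD i 0 + s.getD j 0 > 0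
      · simp only [hpos, if_true]
        have hcast : (j : Int) - 1 = ((j - 1 : Nat) : Int) := by omega
        rw [hcast, ih i (j - 1) (by omega) (by omega)]
        have hall : pvIcnt (pvPred s j) i j = j - i := by
          apply pvIcnt_all
          intro k hk1 hk2
          unfold pvPred
          have : s.getD i 0 ≤ s.getD k 0 := pvMono s hs i k hk1 (by omega)
          simp only [decide_eq_true_eq]
          omega
        rw [pvPc_top s i j hij, hall]
        omega
      · simp only [hpos, if_false]
        have hcast : (i : Int) + 1 = ((i + 1 : Nat) : Int) := by omega
        rw [hcast, ih (i + 1) j (by omega) hj]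
        rw [pvPc_bot s hs i j hij hj hpos]
    · have hij' : ¬ ((i : Int) < (j : Int)) := by exact_mod_cast hij
      rw [ValidPairGo]
      simp only [hij', dite_false]
      unfold pvPc
      rw [show j - i = 0 by omega]
      simp

-- B's binary search counts the elements ≤ x in s[lo:hi]
theorem pvGoB (s : List Int) (hs : List.Pairwise (fun a b : Int => a ≤ b) s) (x : Int) :
    ∀ (d lo hi : Nat), hi - lo ≤ d → lo ≤ hi → hi ≤ s.length →
      BisectGo s x (lo : Int) (hi : Int) =
        (lo : Int) + (pvIcnt (fun k => decide (s.getD k 0 ≤ x)) lo hi : Int) := by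
  intro d
  induction d with
  | zero =>
    intro lo hi hd hlh hhs
    have : ¬ ((lo : Int) < (hi : Int)) := by exact_mod_cast by omega
    rw [BisectGo]
    simp [this, pvIcnt_nil _ _ _ (by omega : hi ≤ lo)]
  | succ d ih =>
    intro lo hi hd hlh hhs
    by_cases hlt : lo < hi
    · have hlt' : (lo : Int) < (hi : Int) := by exact_mod_cast hlt
      rw [BisectGo]
      simp only [hlt', dite_true]
      have hmid : PySem.Int.floordiv ((lo : Int) + (hi : Int)) 2 = (((lo + hi) / 2 : Nat) : Int) := by
        rw [show ((lo : Int) + (hi : Int)) = ((lo + hi : Nat) : Int) by push_cast; ring]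
        exact_mod_cast PySem.Int.floordiv_natCast (lo + hi) 2
      set m : Nat := (lo + hi) / 2 with hm
      have hml : lo ≤ m := by omega
      have hmh : m < hi := by omega
      rw [hmid, PySem.List.pyGetD_natCast]
      by_cases hcmp : x < s.getD m 0
      · simp only [hcmp, if_true]
        rw [ih lo m (by omega) (by omega) (by omega)]
        have hzero : pvIcnt (fun k => decide (s.getD k 0 ≤ x)) m hi = 0 := by
          apply pvIcnt_zero
          intro k hk1 hk2
          have : s.getD m 0 ≤ s.getD k 0 := pvMono s hs m k hk1 (by omega)
          simp only [decide_eq_false_iff_not]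
          omega
        rw [pvIcnt_split _ lo m hi hml (by omega), hzero]
        simp
      · simp only [hcmp, if_false]
        have hcast : ((m : Int) : Int) + 1 = ((m + 1 : Nat) : Int) := by omega
        rw [hcast, ih (m + 1) hi (by omega) (by omega) hhs]
        have hall : pvIcnt (fun k => decide (s.getD k 0 ≤ x)) lo (m + 1) = m + 1 - lo := by
          apply pvIcnt_all
          intro k hk1 hk2
          have : s.getD k 0 ≤ s.getD m 0 := pvMono s hs k m (by omega) (by omega)
          simp only [decide_eq_true_eq]
          omega
        rw [pvIcnt_split _ lo (m + 1) hi (by omega) (by omega), hall]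
        omega
    · have : ¬ ((lo : Int) < (hi : Int)) := by exact_mod_cast hlt
      rw [BisectGo]
      simp [this, pvIcnt_nil _ _ _ (by omega : hi ≤ lo)]

-- B's per-j term equals the pair count against index j
theorem pvTerm (s : List Int) (hs : List.Pairwise (fun a b : Int => a ≤ b) s)
    (j : Nat) (hj : j ≤ s.length) :
    (j : Int) - BisectGo s (-(s.getD j 0)) 0 (j : Int) = (pvIcnt (pvPred s j) 0 j : Int) := by
  have h0 : ((0 : Nat) : Int) = (0 : Int) := rfl
  have hb := pvGoB s hs (-(s.getD j 0)) j 0 j (by omega) (by omega) hj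
  rw [h0] at hb
  rw [hb]
  have hnot := pvIcnt_not (fun k => decide (s.getD k 0 ≤ -(s.getD j 0))) 0 j (by omega)
  have hfun : (fun k => !(decide (s.getD k 0 ≤ -(s.getD j 0)))) = pvPred s j := by
    funext k
    unfold pvPred
    by_cases h : s.getD k 0 ≤ -(s.getD j 0)
    · simp only [h, decide_true, Bool.not_true]
      symm
      simp only [decide_eq_false_iff_not]
      omega
    · simp only [h, decide_false, Bool.not_false]
      symm
      simp only [decide_eq_true_eq]
      omega
  rw [hfun] at hnot
  omega

-- foldl of '+ term' is init plus the sum of the terms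
theorem pvFoldlAdd (t : Int → Int) (l : List Int) :
    ∀ init : Int, l.foldl (fun c j => c + t j) init = init + (l.map t).sum := by
  induction l with
  | nil => simp
  | cons x xs ih => intro init; simp [ih]; ring

-- ===== VERDICT (by name: the statement is the Claim_ definition above) =====
theorem ValidPair_spec : Claim_equal_ValidPair := by
  intro arr n _hdom hpre
  unfold Spec_ValidPair ValidPair ValidPair_alt
  set s := PySem.List.sorted arr (fun x => x) false with hsdef
  have hs : List.Pairwise (fun a b : Int => a ≤ b) s := by
    have := PySem.List.sorted_pairwise arr (fun x => x)
    simpa using this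
  have hlen : s.length = arr.length := PySem.List.length_sorted arr (fun x => x) false
  have hpre' : n ≤ (s.length : Int) := by
    unfold Pre_ValidPair at hpre; omega
  by_cases hn : n ≤ 0
  · -- both sides trivially 0
    have hA : ValidPairGo s 0 (n - 1) 0 = 0 := by
      have hng : ¬ ((0 : Int) < n - 1) := by omega
      rw [ValidPairGo, dif_neg hng]
    have hB : PySem.List.pyRange 0 n 1 = [] := PySem.List.pyRange_one_eq_nil (by omega)
    simp [hA, hB]
  · replace hn : 0 < n := by omega
    set N : Nat := n.toNat with hN
    have hNn : (N : Int) = n := by omega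
    have hNlen : N ≤ s.length := by omega
    have hNpos : 1 ≤ N := by omega
    -- A side
    have hA : ValidPairGo s 0 (n - 1) 0 = (pvPc s 0 (N - 1) : Int) := by
      have hcast : (n - 1 : Int) = ((N - 1 : Nat) : Int) := by omega
      rw [hcast]
      have := pvGoA s hs (N - 1) 0 (N - 1) (by omega) (by omega) 0
      simpa using this
    -- B side
    have hB : (PySem.List.pyRange 0 n 1).foldl
        (fun cost j => cost + (j - BisectGo s (-(PySem.List.pyGetD s j 0)) 0 j)) 0
        = ((List.range N).map (fun k => (pvIcnt (pvPred s k) 0 k : Int))).sum := by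
      rw [pvFoldlAdd (fun j => j - BisectGo s (-(PySem.List.pyGetD s j 0)) 0 j)]
      rw [PySem.List.pyRange_one 0 n]
      rw [show (n - 0).toNat = N by omega]
      rw [List.map_map]
      simp only [zero_add]
      congr 1
      apply List.map_congr_left
      intro k hk
      have hkN : k < N := List.mem_range.mp hk
      simp only [Function.comp_apply, PySem.List.pyGetD_natCast]
      exact pvTerm s hs k (by omega)
    rw [hA, hB]
    -- the two sums agree
    have hsum : ((List.range N).map (fun k => (pvIcnt (pvPred s k) 0 k : Int))).sum
        = (pvPc s 0 (N - 1) : Int) := by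
      unfold pvPc
      rw [List.range_eq_range']
      rw [show N = (N - 1) + 1 by omega, List.range'_succ]
      rw [List.map_cons, List.sum_cons]
      rw [pvIcnt_nil _ _ _ (le_refl 0)]
      simp only [Nat.cast_zero, zero_add, Nat.sub_zero]
      rw [show N - 1 + 1 - 1 = N - 1 by omega]
      rw [Nat.cast_list_sum, List.map_map]
      rfl
    rw [hsum]
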